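-- pv_equiv track=rewrite | github.com/Plutonion-Pix/leaf | Leaf/old/compiler.py | readable_C
-- ===== SOURCE A (Python) =====
-- def readable_C(s):
-- 	r=""
-- 	tabs = 0
-- 	spl = [""]
-- 	for i in s:
-- 		if i == ";":
-- 			spl.append("")
-- 		elif i in "{}":
-- 			spl.append(i)
-- 			spl.append("")
-- 		else:
-- 			spl[-1] += i
-- 	for n,i in enumerate(spl):
-- 		if i == "{":
-- 			tabs += 1
-- 			r+="\t"*tabs+i+'\n'
-- 		elif i == "}":
-- 			tabs -= 1
-- 			r+="\t"*tabs+i+";\n"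
-- 		else:
-- 			if n!=len(spl)-1 and spl[n+1] == "{":
-- 				r+="\t"*tabs+i
-- 			else:
-- 				r+="\t"*tabs+i+";\n"
-- 	return r
-- ===== SOURCE B (Python) =====
-- def readable_C(s):
--     # Single pass: accumulate the current statement text; emit on each structural char.
--     r = []
--     cur = ""
--     tabs = 0
--     for c in s:
--         if c == ";":
--             r.append("\t" * tabs + cur + ";\n")
--             cur = ""
--         elif c == "{":
--             r.append("\t" * tabs + cur)
--             tabs += 1
--             r.append("\t" * tabs + "{\n")
--             cur = ""
--         elif c == "}":
--             r.append("\t" * tabs + cur + ";\n")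
--             tabs -= 1
--             r.append("\t" * tabs + "};\n")
--             cur = ""
--         else:
--             cur += c
--     r.append("\t" * tabs + cur + ";\n")
--     return "".join(r)
-- ===== Notes on version B (the rewrite author's own statement) =====
-- stated objective: simpler
-- what changed: Replaced A's two passes (build a token list from s by repeated string concatenation onto the last token, then re-scan it with enumerate and a one-token lookahead) by a single pass over the characters that keeps the current statement text, the tab depth, and a list of output pieces joined once at the end, emitting directly on each structural character with no intermediate token list.
import Mathlib
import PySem

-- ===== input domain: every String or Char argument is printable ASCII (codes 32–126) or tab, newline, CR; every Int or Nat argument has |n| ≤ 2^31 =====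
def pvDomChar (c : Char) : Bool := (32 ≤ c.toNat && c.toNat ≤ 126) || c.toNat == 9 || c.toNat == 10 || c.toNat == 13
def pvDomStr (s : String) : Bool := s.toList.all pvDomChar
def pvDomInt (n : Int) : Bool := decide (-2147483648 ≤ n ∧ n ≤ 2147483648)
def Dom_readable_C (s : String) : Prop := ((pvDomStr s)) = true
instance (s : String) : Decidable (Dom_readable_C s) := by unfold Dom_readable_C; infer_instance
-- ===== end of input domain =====

-- B replaces A's two passes (token-splitting list + lookahead loop) by a single pass over the
-- characters with a current-statement accumulator; objective: simpler (same exact output).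

-- "\t" * tabs  (Python: empty string for tabs ≤ 0; Int.toNat clamps identically)
def tabsRep (t : Int) : List Char := List.replicate t.toNat '\t'

-- ===== PORT A =====
-- first loop body: split s into tokens (spl[-1] += i appends to the last token)
def splStep (spl : List (List Char)) (c : Char) : List (List Char) :=
  if c = ';' then spl ++ [[]]
  else if c = '{' ∨ c = '}' then spl ++ [[c], []]
  else spl.dropLast ++ [(spl.getLast?.getD []) ++ [c]]

-- second loop: enumerate(spl) with the spl[n+1] == "{" lookahead (rest.head? = some ['{'])
def pass2 : Int → List (List Char) → List Char
  | _, [] => []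
  | tabs, i :: rest =>
    if i = ['{'] then tabsRep (tabs + 1) ++ i ++ ['\n'] ++ pass2 (tabs + 1) rest
    else if i = ['}'] then tabsRep (tabs - 1) ++ i ++ [';', '\n'] ++ pass2 (tabs - 1) rest
    else if rest.head? = some ['{'] then tabsRep tabs ++ i ++ pass2 tabs rest
    else tabsRep tabs ++ i ++ [';', '\n'] ++ pass2 tabs rest

def readable_C (s : String) : String :=
  String.ofList (pass2 0 (List.foldl splStep [([] : List Char)] s.toList))

-- ===== PORT B =====
-- single-pass loop body: state (r pieces, current statement, tabs)
def altStep (st : List (List Char) × List Char × Int) (c : Char) :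
    List (List Char) × List Char × Int :=
  let (r, cur, tabs) := st
  if c = ';' then (r ++ [tabsRep tabs ++ cur ++ [';', '\n']], [], tabs)
  else if c = '{' then
    (r ++ [tabsRep tabs ++ cur, tabsRep (tabs + 1) ++ ['{', '\n']], [], tabs + 1)
  else if c = '}' then
    (r ++ [tabsRep tabs ++ cur ++ [';', '\n'], tabsRep (tabs - 1) ++ ['}', ';', '\n']], [], tabs - 1)
  else (r, cur ++ [c], tabs)

def readable_C_alt (s : String) : String :=
  let st := List.foldl altStep (([] : List (List Char)), ([] : List Char), (0 : Int)) s.toList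
  String.ofList (st.1 ++ [tabsRep st.2.2 ++ st.2.1 ++ [';', '\n']]).flatten

-- ===== PRECONDITION & SPEC =====
def Spec_readable_C (s : String) (out : String) : Prop := out = readable_C_alt s
instance (s : String) (out : String) : Decidable (Spec_readable_C s out) := by unfold Spec_readable_C; infer_instance

-- ===== CLAIM (what is proved, stated in full; the proofs are below) =====
def Claim_equal_readable_C : Prop := ∀ (s : String), Dom_readable_C s → Spec_readable_C s (readable_C s)

-- ===== LEMMAS AND PROOFS =====

-- reference single-pass emission; both ports are reduced to this
def loopB : List Char → Int → List Char → List Char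
  | cur, tabs, [] => tabsRep tabs ++ cur ++ [';', '\n']
  | cur, tabs, c :: cs =>
    if c = ';' then tabsRep tabs ++ cur ++ [';', '\n'] ++ loopB [] tabs cs
    else if c = '{' then
      tabsRep tabs ++ cur ++ (tabsRep (tabs + 1) ++ ['{', '\n']) ++ loopB [] (tabs + 1) cs
    else if c = '}' then
      tabsRep tabs ++ cur ++ [';', '\n'] ++ (tabsRep (tabs - 1) ++ ['}', ';', '\n']) ++ loopB [] (tabs - 1) cs
    else loopB (cur ++ [c]) tabs cs

theorem splStep_ne_nil (l : List (List Char)) (c : Char) : splStep l c ≠ [] := by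
  unfold splStep; split_ifs <;> simp

theorem splStep_append (pre l : List (List Char)) (c : Char) (h : l ≠ []) :
    splStep (pre ++ l) c = pre ++ splStep l c := by
  rcases List.eq_nil_or_concat l with rfl | ⟨ys, y, rfl⟩
  · exact absurd rfl h
  · unfold splStep
    split_ifs <;> simp

theorem foldl_splStep_append (cs : List Char) (pre : List (List Char)) :
    ∀ l : List (List Char), l ≠ [] →
      List.foldl splStep (pre ++ l) cs = pre ++ List.foldl splStep l cs := by
  induction cs with
  | nil => intro l _; simp
  | cons c cs ih =>
    intro l h
    simp only [List.foldl_cons]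
    rw [splStep_append pre l c h, ih _ (splStep_ne_nil l c)]

theorem head_fold_no_brace (cs : List Char) :
    ∀ l : List Char, '{' ∉ l →
      (List.foldl splStep [l] cs).head? ≠ some ['{'] := by
  induction cs with
  | nil =>
    intro l hl h
    rw [List.foldl_nil, List.head?_cons, Option.some_inj] at h
    subst h; simp at hl
  | cons c cs ih =>
    intro l hl
    by_cases h1 : c = ';'
    · have hs : splStep [l] c = [l] ++ [[]] := by simp [splStep, h1]
      rw [List.foldl_cons, hs, foldl_splStep_append cs [l] [[]] (by simp)]
      intro h
      rw [List.cons_append, List.head?_cons, Option.some_inj] at h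
      subst h; simp at hl
    · by_cases h2 : c = '{' ∨ c = '}'
      · have hs : splStep [l] c = [l] ++ [[c], []] := by simp [splStep, h1, h2]
        rw [List.foldl_cons, hs, foldl_splStep_append cs [l] [[c], []] (by simp)]
        intro h
        rw [List.cons_append, List.head?_cons, Option.some_inj] at h
        subst h; simp at hl
      · have hs : splStep [l] c = [l ++ [c]] := by simp [splStep, h1, h2]
        rw [List.foldl_cons, hs]
        apply ih
        simp only [List.mem_append, List.mem_singleton]
        rintro (h | rfl)
        · exact hl h
        · exact h2 (Or.inl rfl)

theorem pass2_open (tabs : Int) (rest : List (List Char)) :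
    pass2 tabs (['{'] :: rest) = tabsRep (tabs + 1) ++ ['{'] ++ ['\n'] ++ pass2 (tabs + 1) rest := by
  simp [pass2]

theorem pass2_close (tabs : Int) (rest : List (List Char)) :
    pass2 tabs (['}'] :: rest) = tabsRep (tabs - 1) ++ ['}'] ++ [';', '\n'] ++ pass2 (tabs - 1) rest := by
  simp [pass2]

theorem pass2_plain (tabs : Int) (i : List Char) (rest : List (List Char))
    (h1 : i ≠ ['{']) (h2 : i ≠ ['}']) (h3 : rest.head? ≠ some ['{']) :
    pass2 tabs (i :: rest) = tabsRep tabs ++ i ++ [';', '\n'] ++ pass2 tabs rest := by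
  rw [pass2, if_neg h1, if_neg h2, if_neg h3]

theorem pass2_before_open (tabs : Int) (i : List Char) (rest : List (List Char))
    (h1 : i ≠ ['{']) (h2 : i ≠ ['}']) (h3 : rest.head? = some ['{']) :
    pass2 tabs (i :: rest) = tabsRep tabs ++ i ++ pass2 tabs rest := by
  rw [pass2, if_neg h1, if_neg h2, if_pos h3]

theorem main_fusion (cs : List Char) :
    ∀ (cur : List Char) (tabs : Int), '{' ∉ cur → '}' ∉ cur →
      pass2 tabs (List.foldl splStep [cur] cs) = loopB cur tabs cs := by
  induction cs with
  | nil =>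
    intro cur tabs h1 h2
    have hc1 : cur ≠ ['{'] := by rintro rfl; simp at h1
    have hc2 : cur ≠ ['}'] := by rintro rfl; simp at h2
    rw [List.foldl_nil, pass2_plain tabs cur [] hc1 hc2 (by simp), pass2, loopB]
    simp
  | cons c cs ih =>
    intro cur tabs h1 h2
    have hc1 : cur ≠ ['{'] := by rintro rfl; simp at h1
    have hc2 : cur ≠ ['}'] := by rintro rfl; simp at h2
    by_cases hsc : c = ';'
    · have hs : splStep [cur] c = [cur] ++ [[]] := by simp [splStep, hsc]
      rw [List.foldl_cons, hs, foldl_splStep_append cs [cur] [[]] (by simp)]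
      have hnb := head_fold_no_brace cs [] (by simp)
      rw [List.cons_append, List.nil_append,
        pass2_plain tabs cur _ hc1 hc2 hnb, ih [] tabs (by simp) (by simp), loopB]
      simp [hsc]
    · by_cases hob : c = '{'
      · have hs : splStep [cur] c = [cur, ['{']] ++ [[]] := by simp [splStep, hob]
        rw [List.foldl_cons, hs, foldl_splStep_append cs [cur, ['{']] [[]] (by simp)]
        rw [show ([cur, ['{']] : List (List Char)) ++ List.foldl splStep [[]] cs
            = cur :: (['{'] :: List.foldl splStep [[]] cs) from rfl]
        rw [pass2_before_open tabs cur _ hc1 hc2 (by simp), pass2_open,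
          ih [] (tabs + 1) (by simp) (by simp), loopB]
        simp [hob]
      · by_cases hcb : c = '}'
        · have hs : splStep [cur] c = [cur, ['}']] ++ [[]] := by simp [splStep, hcb]
          rw [List.foldl_cons, hs, foldl_splStep_append cs [cur, ['}']] [[]] (by simp)]
          rw [show ([cur, ['}']] : List (List Char)) ++ List.foldl splStep [[]] cs
              = cur :: (['}'] :: List.foldl splStep [[]] cs) from rfl]
          rw [pass2_plain tabs cur _ hc1 hc2 (by simp), pass2_close,
            ih [] (tabs - 1) (by simp) (by simp), loopB]
          simp [hsc, hcb]
        · have hs : splStep [cur] c = [cur ++ [c]] := by simp [splStep, hsc, hob, hcb]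
          have m1 : '{' ∉ cur ++ [c] := by
            simp only [List.mem_append, List.mem_singleton]
            rintro (h | h)
            · exact h1 h
            · exact hob h.symm
          have m2 : '}' ∉ cur ++ [c] := by
            simp only [List.mem_append, List.mem_singleton]
            rintro (h | h)
            · exact h2 h
            · exact hcb h.symm
          rw [List.foldl_cons, hs, ih (cur ++ [c]) tabs m1 m2, loopB]
          simp [hsc, hob, hcb]

theorem alt_fusion (cs : List Char) :
    ∀ (r : List (List Char)) (cur : List Char) (tabs : Int),
      ((List.foldl altStep (r, cur, tabs) cs).1 ++
        [tabsRep (List.foldl altStep (r, cur, tabs) cs).2.2 ++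
          (List.foldl altStep (r, cur, tabs) cs).2.1 ++ [';', '\n']]).flatten
      = r.flatten ++ loopB cur tabs cs := by
  induction cs with
  | nil => intro r cur tabs; simp [loopB]
  | cons c cs ih =>
    intro r cur tabs
    by_cases hsc : c = ';'
    · simp only [List.foldl_cons, altStep, if_pos hsc]
      rw [ih]
      simp [loopB, hsc]
    · by_cases hob : c = '{'
      · simp only [List.foldl_cons, altStep, if_neg hsc, if_pos hob]
        rw [ih]
        simp [loopB, hob]
      · by_cases hcb : c = '}'
        · simp only [List.foldl_cons, altStep, if_neg hsc, if_neg hob, if_pos hcb]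
          rw [ih]
          simp [loopB, hcb]
        · simp only [List.foldl_cons, altStep, if_neg hsc, if_neg hob, if_neg hcb]
          rw [ih]
          simp [loopB, hsc, hob, hcb]

-- ===== VERDICT (by name: the statement is the Claim_ definition above) =====
theorem readable_C_spec : Claim_equal_readable_C := by
  intro s _
  unfold Spec_readable_C readable_C readable_C_alt
  have hA := main_fusion s.toList [] 0 (by simp) (by simp)
  have hB := alt_fusion s.toList [] [] 0
  simp only [List.flatten_nil, List.nil_append] at hB
  rw [hA]
  exact congrArg String.ofList hB.symm
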